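-- pv_equiv track=rewrite | github.com/ICRAR/ngas | src/ngamsCore/ngamsLib/ngamsDbCore.py | getNgasSummary1Cols
-- ===== SOURCE A (Python) =====
-- _sum1Def = [["nd.slot_id",         "SUM1_SLOT_ID"],
--             ["nd.mount_point",     "SUM1_MT_PT"],
--             ["nf.file_name",       "SUM1_FILENAME"],
--             ["nf.checksum",        "SUM1_CHECKSUM"],
--             ["nf.checksum_plugin", "SUM1_CHECKSUM_PI"],
--             ["nf.file_id",         "SUM1_FILE_ID"],
--             ["nf.file_version",    "SUM1_VERSION"],
--             ["nf.file_size",       "SUM1_FILE_SIZE"],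
--             ["nf.file_status",     "SUM1_FILE_STATUS"],
--             ["nd.disk_id",         "SUM1_DISK_ID"],
--             ["nf.file_ignore",     "SUM1_FILE_IGNORE"],
--             ["nd.host_id",         "SUM1_HOST_ID"]]
--
-- def getNgasSummary1Cols(file_ignore_columnname):
--     """
--     Return reference to a string defining the lay-out of the table.
--
--     Returns:   Reference to string listing all columns (string).
--     """
--     colnames = []
--     for colDef in _sum1Def:
--         colname = colDef[0]
--         if colname == 'nf.file_ignore':
--             colnames.append('nf.%s' % (file_ignore_columnname,))
--         else:
--             colnames.append(colname)
--     return ", ".join(colnames)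
-- ===== SOURCE B (Python) =====
-- _SUM1_PREFIX = ("nd.slot_id, nd.mount_point, nf.file_name, nf.checksum, "
--                 "nf.checksum_plugin, nf.file_id, nf.file_version, nf.file_size, "
--                 "nf.file_status, nd.disk_id, nf.")
-- _SUM1_SUFFIX = ", nd.host_id"
--
-- def getNgasSummary1Cols(file_ignore_columnname):
--     return _SUM1_PREFIX + file_ignore_columnname + _SUM1_SUFFIX
-- ===== Notes on version B (the rewrite author's own statement) =====
-- stated objective: simpler
-- what changed: A's per-column loop with an if/else substitution over the table is replaced by a closed form: a literal constant prefix and suffix concatenated around the argument, with no table scan or join at all.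
import Mathlib
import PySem

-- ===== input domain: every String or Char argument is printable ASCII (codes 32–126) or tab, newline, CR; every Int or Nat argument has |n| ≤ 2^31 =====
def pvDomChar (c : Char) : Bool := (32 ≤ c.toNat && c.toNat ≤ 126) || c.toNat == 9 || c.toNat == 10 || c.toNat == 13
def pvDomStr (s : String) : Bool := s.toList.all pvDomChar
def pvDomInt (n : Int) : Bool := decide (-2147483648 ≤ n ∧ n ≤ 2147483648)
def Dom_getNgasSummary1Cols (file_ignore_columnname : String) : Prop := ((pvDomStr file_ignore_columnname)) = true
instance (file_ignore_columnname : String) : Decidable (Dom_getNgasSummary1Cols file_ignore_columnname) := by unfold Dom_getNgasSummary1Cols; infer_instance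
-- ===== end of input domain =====

-- B replaces A's loop over the column table (with its if/else substitution and join)
-- by a closed form: a literal prefix and suffix concatenated around the argument; objective: simpler.

-- ===== PORT A =====
def sum1Def : List (String × String) :=
  [("nd.slot_id",         "SUM1_SLOT_ID"),
   ("nd.mount_point",     "SUM1_MT_PT"),
   ("nf.file_name",       "SUM1_FILENAME"),
   ("nf.checksum",        "SUM1_CHECKSUM"),
   ("nf.checksum_plugin", "SUM1_CHECKSUM_PI"),
   ("nf.file_id",         "SUM1_FILE_ID"),
   ("nf.file_version",    "SUM1_VERSION"),
   ("nf.file_size",       "SUM1_FILE_SIZE"),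
   ("nf.file_status",     "SUM1_FILE_STATUS"),
   ("nd.disk_id",         "SUM1_DISK_ID"),
   ("nf.file_ignore",     "SUM1_FILE_IGNORE"),
   ("nd.host_id",         "SUM1_HOST_ID")]

def getNgasSummary1Cols (file_ignore_columnname : String) : String :=
  let colnames : List String :=
    sum1Def.foldl (fun colnames colDef =>
      let colname := colDef.1
      if colname == "nf.file_ignore" then
        colnames ++ ["nf." ++ file_ignore_columnname]
      else
        colnames ++ [colname]) []
  PySem.Str.join ", " colnames

-- ===== PORT B =====
def sum1Prefix : String :=
  "nd.slot_id, nd.mount_point, nf.file_name, nf.checksum, nf.checksum_plugin, nf.file_id, nf.file_version, nf.file_size, nf.file_status, nd.disk_id, nf."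
def sum1Suffix : String := ", nd.host_id"

def getNgasSummary1Cols_alt (file_ignore_columnname : String) : String :=
  sum1Prefix ++ file_ignore_columnname ++ sum1Suffix

-- ===== PRECONDITION & SPEC =====
def Spec_getNgasSummary1Cols (file_ignore_columnname : String) (out : String) : Prop := out = getNgasSummary1Cols_alt file_ignore_columnname
instance (file_ignore_columnname : String) (out : String) : Decidable (Spec_getNgasSummary1Cols file_ignore_columnname out) := by unfold Spec_getNgasSummary1Cols; infer_instance

-- ===== CLAIM (what is proved, stated in full; the proofs are below) =====
def Claim_equal_getNgasSummary1Cols : Prop := ∀ (file_ignore_columnname : String), Dom_getNgasSummary1Cols file_ignore_columnname → Spec_getNgasSummary1Cols file_ignore_columnname (getNgasSummary1Cols file_ignore_columnname)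

-- ===== LEMMAS AND PROOFS =====

-- ===== VERDICT (by name: the statement is the Claim_ definition above) =====
set_option maxRecDepth 8000 in
theorem getNgasSummary1Cols_spec : Claim_equal_getNgasSummary1Cols := by
  intro x _
  unfold Spec_getNgasSummary1Cols getNgasSummary1Cols getNgasSummary1Cols_alt sum1Def sum1Prefix sum1Suffix
  rw [← String.toList_inj]
  simp [PySem.Str.join, PySem.Chars.join, List.intercalate, String.toList_ofList]
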